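-- pv_equiv track=rewrite | github.com/Axreub/ldm-respiratory-motion | backbones/blocks/utils.py | create_pads
-- ===== SOURCE A (Python) =====
-- from typing import List, Tuple
--
-- def create_pads(keep_z: List[bool], img_width=256, img_depth=50) -> Tuple[List[int]]:
--     """Creates padding lists for each layer based on keep_z and channel_multipliers."""
--     pads_xy, pads_z = [], []
--     z_range = 0
--     for i, keep in enumerate(keep_z):
--         xy = img_width
--         xy = [xy := xy // 2 if idx != i else xy % 2 for idx in range(i + 1)][-1]
--         pads_xy.append(xy)
--         if keep:
--             pads_z.append(0)
--         else:
--             z_range += 1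
--             z = img_depth
--             z = [
--                 z := z // 2 if idx != z_range - 1 else z % 2 for idx in range(z_range)
--             ][-1]
--             pads_z.append(z)
--
--     return pads_xy, pads_z
-- ===== SOURCE B (Python) =====
-- def create_pads(keep_z, img_width=256, img_depth=50):
--     """One pass: keep running halved values, one shift per step."""
--     pads_xy, pads_z = [], []
--     w, d = img_width, img_depth
--     for keep in keep_z:
--         pads_xy.append(w % 2)
--         w //= 2
--         if keep:
--             pads_z.append(0)
--         else:
--             pads_z.append(d % 2)
--             d //= 2
--     return pads_xy, pads_z
-- ===== Notes on version B (the rewrite author's own statement) =====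
-- stated objective: faster
-- what changed: B keeps running halved values of img_width/img_depth and updates them with one shift per step, replacing A's per-index list comprehension that re-halves from scratch (and the inner pass over range(i+1)) with an O(1) incremental update.
import Mathlib
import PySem

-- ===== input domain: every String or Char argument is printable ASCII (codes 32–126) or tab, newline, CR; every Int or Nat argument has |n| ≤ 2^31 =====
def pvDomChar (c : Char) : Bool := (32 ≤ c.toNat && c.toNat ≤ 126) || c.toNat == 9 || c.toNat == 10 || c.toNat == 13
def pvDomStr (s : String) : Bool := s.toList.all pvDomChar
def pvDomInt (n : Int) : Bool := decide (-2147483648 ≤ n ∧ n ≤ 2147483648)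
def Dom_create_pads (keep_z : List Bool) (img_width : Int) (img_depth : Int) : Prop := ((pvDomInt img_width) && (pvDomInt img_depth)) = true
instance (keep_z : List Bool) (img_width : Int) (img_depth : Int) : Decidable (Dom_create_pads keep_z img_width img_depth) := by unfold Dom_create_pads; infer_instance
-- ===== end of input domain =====

-- B replaces A's quadratic re-halving (an inner comprehension over range(i+1) per layer)
-- by one pass that keeps running halved values, one shift per step (objective: faster).

-- ===== PORT A =====
-- one loop step of A; the walrus comprehension '[x := … for idx in range(n)][-1]'
-- is ported as the final accumulator of a fold over range(n) (range(n) is nonempty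
-- here since n = i+1 ≥ 1 resp. n = z_range ≥ 1, so '[-1]' is exactly the last state)
def padsStepA (img_width img_depth : Int) (st : List Int × List Int × Int)
    (p : Int × Bool) : List Int × List Int × Int :=
  let pads_xy := st.1
  let pads_z := st.2.1
  let z_range := st.2.2
  let i := p.1
  let keep := p.2
  let xy := (PySem.List.pyRange 0 (i + 1) 1).foldl
      (fun xy idx => if idx ≠ i then PySem.Int.floordiv xy 2 else PySem.Int.mod xy 2) img_width
  let pads_xy := pads_xy ++ [xy]
  if keep then
    (pads_xy, pads_z ++ [(0 : Int)], z_range)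
  else
    let z_range := z_range + 1
    let z := (PySem.List.pyRange 0 z_range 1).foldl
        (fun z idx => if idx ≠ z_range - 1 then PySem.Int.floordiv z 2 else PySem.Int.mod z 2) img_depth
    (pads_xy, pads_z ++ [z], z_range)

def create_pads (keep_z : List Bool) (img_width : Int) (img_depth : Int) : List Int × List Int :=
  let st := (PySem.List.enumerate keep_z 0).foldl (padsStepA img_width img_depth)
    ([], [], (0 : Int))
  (st.1, st.2.1)

-- ===== PORT B =====
-- one loop step of B: state is (pads_xy, pads_z, w, d), the running halved values
def padsStepB (st : List Int × List Int × Int × Int) (keep : Bool) :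
    List Int × List Int × Int × Int :=
  let pads_xy := st.1
  let pads_z := st.2.1
  let w := st.2.2.1
  let d := st.2.2.2
  let pads_xy := pads_xy ++ [PySem.Int.mod w 2]
  let w := PySem.Int.floordiv w 2
  if keep then
    (pads_xy, pads_z ++ [(0 : Int)], w, d)
  else
    (pads_xy, pads_z ++ [PySem.Int.mod d 2], w, PySem.Int.floordiv d 2)

def create_pads_alt (keep_z : List Bool) (img_width : Int) (img_depth : Int) : List Int × List Int :=
  let st := keep_z.foldl padsStepB ([], [], img_width, img_depth)
  (st.1, st.2.1)

-- ===== PRECONDITION & SPEC =====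
def Spec_create_pads (keep_z : List Bool) (img_width : Int) (img_depth : Int) (out : List Int × List Int) : Prop := out = create_pads_alt keep_z img_width img_depth
instance (keep_z : List Bool) (img_width : Int) (img_depth : Int) (out : List Int × List Int) : Decidable (Spec_create_pads keep_z img_width img_depth out) := by unfold Spec_create_pads; infer_instance

-- ===== CLAIM (what is proved, stated in full; the proofs are below) =====
def Claim_equal_create_pads : Prop := ∀ (keep_z : List Bool) (img_width : Int) (img_depth : Int), Dom_create_pads keep_z img_width img_depth → Spec_create_pads keep_z img_width img_depth (create_pads keep_z img_width img_depth)

-- ===== LEMMAS AND PROOFS =====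

/-- `x` halved (floor) `n` times. -/
def halveN : Nat → Int → Int
  | 0, x => x
  | n + 1, x => PySem.Int.floordiv (halveN n x) 2

/-- A fold over `range(n)` whose branch only tests `idx ≠ m` with `n ≤ m`
purely halves `n` times. -/
theorem foldl_halve_prefix (m : Int) : ∀ (n : Nat), (n : Int) ≤ m → ∀ (x : Int),
    (PySem.List.pyRange 0 n 1).foldl
      (fun a idx => if idx ≠ m then PySem.Int.floordiv a 2 else PySem.Int.mod a 2) x
      = halveN n x := by
  intro n
  induction n with
  | zero => intro _ x; simp [halveN]
  | succ n ih =>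
    intro h x
    have h0 : (0 : Int) ≤ (n : Int) := by exact_mod_cast Nat.zero_le n
    have : PySem.List.pyRange 0 ((n : Int) + 1) 1
        = PySem.List.pyRange 0 (n : Int) 1 ++ [(n : Int)] :=
      PySem.List.pyRange_one_succ_right h0
    push_cast
    rw [this, List.foldl_append]
    have hn : ((n : Int) : Int) ≤ m := by push_cast at h ⊢; omega
    rw [ih hn x]
    have hne : (n : Int) ≠ m := by push_cast at h; omega
    simp [hne, halveN]

/-- A's inner comprehension for a nonnegative index `i` is `(x halved i times) mod 2`. -/
theorem inner_fold_eq (i : Int) (hi : 0 ≤ i) (x : Int) :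
    (PySem.List.pyRange 0 (i + 1) 1).foldl
      (fun a idx => if idx ≠ i then PySem.Int.floordiv a 2 else PySem.Int.mod a 2) x
      = PySem.Int.mod (halveN i.toNat x) 2 := by
  have hsplit : PySem.List.pyRange 0 (i + 1) 1 = PySem.List.pyRange 0 i 1 ++ [i] :=
    PySem.List.pyRange_one_succ_right hi
  rw [hsplit, List.foldl_append]
  have hcast : ((i.toNat : Nat) : Int) = i := Int.toNat_of_nonneg hi
  have := foldl_halve_prefix i i.toNat (le_of_eq hcast) x
  rw [hcast] at this
  rw [this]
  simp

/-- Loop invariant: A's fold over `enumerate keep_z k` with z-counter `z` matches B's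
fold when B's running values are `img_width` halved `k` times and `img_depth`
halved `z` times; the two pad lists agree. -/
theorem fold_agree (W D : Int) : ∀ (l : List Bool) (pxy pz : List Int) (k z : Nat),
    (((PySem.List.enumerate l (k : Int)).foldl (padsStepA W D) (pxy, pz, (z : Int))).1
      = (l.foldl padsStepB (pxy, pz, halveN k W, halveN z D)).1)
    ∧ (((PySem.List.enumerate l (k : Int)).foldl (padsStepA W D) (pxy, pz, (z : Int))).2.1
      = (l.foldl padsStepB (pxy, pz, halveN k W, halveN z D)).2.1) := by
  intro l
  induction l with
  | nil => intro pxy pz k z; simp [PySem.List.enumerate_nil]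
  | cons keep rest ih =>
    intro pxy pz k z
    rw [PySem.List.enumerate_cons]
    simp only [List.foldl_cons]
    have hk0 : (0 : Int) ≤ (k : Int) := by exact_mod_cast Nat.zero_le k
    have hA : padsStepA W D (pxy, pz, (z : Int)) ((k : Int), keep)
        = if keep then (pxy ++ [PySem.Int.mod (halveN k W) 2], pz ++ [(0:Int)], (z : Int))
          else (pxy ++ [PySem.Int.mod (halveN k W) 2],
                pz ++ [PySem.Int.mod (halveN z D) 2], ((z + 1 : Nat) : Int)) := by
      unfold padsStepA
      simp only [inner_fold_eq (k : Int) hk0, Int.toNat_natCast]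
      cases keep with
      | true => simp
      | false =>
        have h1 : (z : Int) + 1 - 1 = (z : Int) := by ring
        simp only [Bool.false_eq_true, if_false, h1]
        rw [inner_fold_eq (z : Int) (by exact_mod_cast Nat.zero_le z)]
        simp only [Int.toNat_natCast]
        push_cast
        rfl
    have hB : padsStepB (pxy, pz, halveN k W, halveN z D) keep
        = if keep then (pxy ++ [PySem.Int.mod (halveN k W) 2], pz ++ [(0:Int)],
                        halveN (k+1) W, halveN z D)
          else (pxy ++ [PySem.Int.mod (halveN k W) 2],
                pz ++ [PySem.Int.mod (halveN z D) 2], halveN (k+1) W, halveN (z+1) D) := by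
      unfold padsStepB
      cases keep <;> simp [halveN]
    rw [hA, hB]
    cases keep with
    | true =>
      simp only [if_true]
      have := ih (pxy ++ [PySem.Int.mod (halveN k W) 2]) (pz ++ [(0:Int)]) (k+1) z
      push_cast at this ⊢
      exact this
    | false =>
      simp only [Bool.false_eq_true, if_false]
      have := ih (pxy ++ [PySem.Int.mod (halveN k W) 2])
        (pz ++ [PySem.Int.mod (halveN z D) 2]) (k+1) (z+1)
      push_cast at this ⊢
      exact this

-- ===== VERDICT (by name: the statement is the Claim_ definition above) =====
theorem create_pads_spec : Claim_equal_create_pads := by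
  intro keep_z W D _
  show create_pads keep_z W D = create_pads_alt keep_z W D
  unfold create_pads create_pads_alt
  have h := fold_agree W D keep_z [] [] 0 0
  simp only [Nat.cast_zero, halveN] at h
  exact Prod.ext h.1 h.2
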